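-- pv_equiv track=rewrite | github.com/gaburruela/Test | tarea_1_example_solution.py | invert_case
-- ===== SOURCE A (Python) =====
-- def invert_case(cadena):
--     # Verifica que la entrada sea un string
--     if type(cadena) is not str:
--         return -16, None
--
--     # Ciclo que va revisando cada caracter de la entrada pertenezca al alfabeto
--     for caracter in cadena:
--         if not ('a' <= caracter <= 'z' or 'A' <= caracter <= 'Z'):
--             return -32, None
--
--     # Veriffica que la entrada no este vacia
--     if len(cadena) == 0:
--         return -48, None
--
--     # Ciclo que convierte mayuscula a minuscula y viceversa
--     nueva_cadena = ""
--     for caracter in cadena: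
--         if caracter.islower():
--             nueva_cadena += caracter.upper()
--         else:
--             nueva_cadena += caracter.lower()
--     return 0, nueva_cadena
-- ===== SOURCE B (Python) =====
-- def invert_case(cadena):
--     # Single fused pass: validate and swap case in one loop (same results as A).
--     if type(cadena) is not str:
--         return -16, None
--     acc = []
--     for caracter in cadena:
--         if not ('a' <= caracter <= 'z' or 'A' <= caracter <= 'Z'):
--             return -32, None
--         acc.append(caracter.upper() if caracter.islower() else caracter.lower())
--     if not cadena:
--         return -48, None
--     return 0, ''.join(acc)
-- ===== Notes on version B (the rewrite author's own statement) =====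
-- stated objective: simpler
-- what changed: Fuses A's separate validation pass and case-swapping pass into one loop with an early return on the first non-letter, joining the accumulated swapped characters at the end.
import Mathlib
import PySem

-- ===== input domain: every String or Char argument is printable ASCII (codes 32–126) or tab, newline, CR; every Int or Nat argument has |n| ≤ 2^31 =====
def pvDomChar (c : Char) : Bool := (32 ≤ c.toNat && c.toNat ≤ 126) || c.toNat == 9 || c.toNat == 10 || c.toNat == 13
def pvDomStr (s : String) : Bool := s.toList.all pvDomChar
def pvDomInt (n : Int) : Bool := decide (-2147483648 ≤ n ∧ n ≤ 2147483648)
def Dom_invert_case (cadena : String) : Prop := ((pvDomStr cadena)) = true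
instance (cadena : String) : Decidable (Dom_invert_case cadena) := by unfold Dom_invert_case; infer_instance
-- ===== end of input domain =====

-- B fuses A's separate validation and transformation passes into one early-returning loop (objective: simpler).
-- The 'type(cadena) is not str' guard of both Pythons cannot fire under the type convention (cadena : String) and is omitted in both ports.

-- ===== PORT A =====
-- A's first loop: early return -32 on the first character outside a-z/A-Z.
def pvA_allLetters : List Char → Bool
  | [] => true
  | c :: cs => if ¬ (('a' ≤ c ∧ c ≤ 'z') ∨ ('A' ≤ c ∧ c ≤ 'Z')) then false else pvA_allLetters cs

-- A's swap of one character: islower → upper, else lower.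
def pvSwap (c : Char) : Char :=
  if PySem.Chars.islower c then PySem.Chars.upperChar c else PySem.Chars.lowerChar c

def invert_case (cadena : String) : Int × Option String :=
  if pvA_allLetters cadena.toList = false then (-32, none)
  else if cadena.toList.length = 0 then (-48, none)
  else
    -- second loop: nueva_cadena += swapped character
    let nueva := cadena.toList.foldl (fun acc c => acc ++ [pvSwap c]) []
    (0, some (String.ofList nueva))

-- ===== PORT B =====
-- B's single loop: early return -32, otherwise append the swapped character to acc.
def pvB_go : List Char → List Char → Option (List Char)
  | acc, [] => some acc
  | acc, c :: cs =>
    if ¬ (('a' ≤ c ∧ c ≤ 'z') ∨ ('A' ≤ c ∧ c ≤ 'Z')) then none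
    else pvB_go (acc ++ [pvSwap c]) cs

def invert_case_alt (cadena : String) : Int × Option String :=
  match pvB_go [] cadena.toList with
  | none => (-32, none)
  | some acc => if cadena.toList = [] then (-48, none) else (0, some (String.ofList acc))

-- ===== PRECONDITION & SPEC =====
def Spec_invert_case (cadena : String) (out : Int × Option String) : Prop := out = invert_case_alt cadena
instance (cadena : String) (out : Int × Option String) : Decidable (Spec_invert_case cadena out) := by unfold Spec_invert_case; infer_instance

-- ===== CLAIM (what is proved, stated in full; the proofs are below) =====
def Claim_equal_invert_case : Prop := ∀ (cadena : String), Dom_invert_case cadena → Spec_invert_case cadena (invert_case cadena)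

-- ===== LEMMAS AND PROOFS =====
theorem pvB_go_none (cs : List Char) (acc : List Char) :
    pvB_go acc cs = none ↔ pvA_allLetters cs = false := by
  induction cs generalizing acc with
  | nil => simp [pvB_go, pvA_allLetters]
  | cons c cs ih =>
    simp only [pvB_go, pvA_allLetters]
    split_ifs with h
    · exact ih _
    · simp

theorem pvB_go_some (cs : List Char) (acc : List Char) (h : pvA_allLetters cs = true) :
    pvB_go acc cs = some (cs.foldl (fun a c => a ++ [pvSwap c]) acc) := by
  induction cs generalizing acc with
  | nil => simp [pvB_go]
  | cons c cs ih =>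
    simp only [pvA_allLetters] at h
    simp only [pvB_go, List.foldl_cons]
    split_ifs at h ⊢ with hc
    · exact ih _ h

-- ===== VERDICT (by name: the statement is the Claim_ definition above) =====
theorem invert_case_spec : Claim_equal_invert_case := by
  intro cadena _
  unfold Spec_invert_case invert_case invert_case_alt
  cases hv : pvA_allLetters cadena.toList with
  | false =>
    rw [← pvB_go_none _ []] at hv
    simp [hv]
  | true =>
    rw [pvB_go_some _ [] hv]
    simp
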